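-- pv_equiv track=rewrite | github.com/elavoie/non-iid-topology-simulator | tools/setup/topology/d_cliques/decentralized_algorithms/decentralized_greedy_resolving_conflicts.py | get_cycle_from_graph
-- ===== SOURCE A (Python) =====
-- def get_cycle_from_graph(graph, clique_id):
--     cycle = [clique_id]
--     curr = graph[clique_id]
--     min_index = 0
--     while curr != clique_id:
--         cycle.append(curr)
--         if curr < cycle[min_index]:
--             min_index = len(cycle) - 1
--         curr = graph[curr]
--     cycle = cycle[min_index:] + cycle[:min_index]
--     return cycle, (len(cycle) - min_index) % len(cycle)
-- ===== SOURCE B (Python) =====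
-- def get_cycle_from_graph(graph, clique_id):
--     # Pass 1: find the minimum node on the cycle and the cycle length.
--     m = clique_id
--     n = graph[clique_id]
--     length = 1
--     while n != clique_id:
--         if n < m:
--             m = n
--         n = graph[n]
--         length += 1
--     # Pass 2: re-walk starting at the minimum node, emitting the rotated
--     # cycle directly; clique_id's position in it is the second return value.
--     out = []
--     pos = 0
--     n = m
--     for i in range(length):
--         if n == clique_id:
--             pos = i
--         out.append(n)
--         n = graph[n]
--     return out, pos
-- ===== Notes on version B (the rewrite author's own statement) =====
-- stated objective: alternative
-- what changed: B never rotates a list: a first walk finds only the minimum node and the cycle length, then a second walk starting at the minimum node emits the rotated cycle directly and records clique_id's position, replacing A's fused min-index tracking plus slice rotation and modular arithmetic.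
import Mathlib
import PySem

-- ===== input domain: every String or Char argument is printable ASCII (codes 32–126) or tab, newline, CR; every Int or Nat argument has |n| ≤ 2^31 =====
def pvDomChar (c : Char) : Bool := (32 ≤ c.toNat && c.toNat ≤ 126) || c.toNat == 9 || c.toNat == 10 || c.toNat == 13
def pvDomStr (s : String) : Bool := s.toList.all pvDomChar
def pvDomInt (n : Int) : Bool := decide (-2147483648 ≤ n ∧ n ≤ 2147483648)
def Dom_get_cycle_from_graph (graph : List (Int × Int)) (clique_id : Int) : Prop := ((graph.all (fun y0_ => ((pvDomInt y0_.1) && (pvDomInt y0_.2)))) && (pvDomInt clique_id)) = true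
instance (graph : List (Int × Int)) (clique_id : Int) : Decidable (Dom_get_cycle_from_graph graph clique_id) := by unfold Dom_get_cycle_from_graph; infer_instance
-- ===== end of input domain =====

-- B never rotates: one walk finds the minimum node and the cycle length, a second walk
-- starting at the minimum node emits the rotated cycle directly and records clique_id's position.

-- dict lookup: first match in the association list (the type convention for Python dicts)
def pvGet (graph : List (Int × Int)) (k : Int) : Option Int :=
  (graph.find? (fun p => p.1 == k)).map Prod.snd

-- ===== PORT A =====
-- the while loop of A; fuel = graph.length + 1 suffices on every input Pre_ admits
-- (the loop visits pairwise-distinct keys of graph). On a failed lookup (Python KeyError,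
-- outside Pre_) the recursion just stops.
def loopA (graph : List (Int × Int)) (clique_id : Int) :
    Nat → Int → List Int → Nat → (List Int × Nat)
  | 0, _, cycle, mi => (cycle, mi)
  | fuel + 1, curr, cycle, mi =>
    if curr = clique_id then (cycle, mi)
    else
      let cycle' := cycle ++ [curr]
      let mi' := if curr < cycle.getD mi 0 then cycle'.length - 1 else mi
      match pvGet graph curr with
      | none => (cycle', mi')
      | some nxt => loopA graph clique_id fuel nxt cycle' mi'

def get_cycle_from_graph (graph : List (Int × Int)) (clique_id : Int) : List Int × Int :=
  match pvGet graph clique_id with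
  | none => ([], 0)  -- Python: KeyError (outside Pre_)
  | some c0 =>
    let r := loopA graph clique_id (graph.length + 1) c0 [clique_id] 0
    let cycle := r.1
    let mi := r.2
    (PySem.List.slice cycle (some (mi : Int)) none ++ PySem.List.slice cycle none (some (mi : Int)),
      PySem.Int.mod ((cycle.length : Int) - (mi : Int)) (cycle.length : Int))

-- ===== PORT B =====
-- B's first while loop: running minimum node and cycle length
def loopB1 (graph : List (Int × Int)) (clique_id : Int) :
    Nat → Int → Int → Nat → (Int × Nat)
  | 0, _, m, len => (m, len)
  | fuel + 1, curr, m, len =>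
    if curr = clique_id then (m, len)
    else
      let m' := if curr < m then curr else m
      match pvGet graph curr with
      | none => (m', len + 1)  -- Python: KeyError (outside Pre_)
      | some nxt => loopB1 graph clique_id fuel nxt m' (len + 1)

-- B's for loop: k iterations left, i the current index; emits nodes, notes clique_id's index
def loopB2 (graph : List (Int × Int)) (clique_id : Int) :
    Nat → Nat → Int → List Int → Nat → (List Int × Nat)
  | 0, _, _, out, pos => (out, pos)
  | k + 1, i, n, out, pos =>
    let pos' := if n = clique_id then i else pos
    let out' := out ++ [n]
    match pvGet graph n with
    | none => (out', pos')  -- Python: KeyError (outside Pre_)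
    | some nxt => loopB2 graph clique_id k (i + 1) nxt out' pos'

def get_cycle_from_graph_alt (graph : List (Int × Int)) (clique_id : Int) : List Int × Int :=
  match pvGet graph clique_id with
  | none => ([], 0)  -- Python: KeyError (outside Pre_)
  | some n0 =>
    let r1 := loopB1 graph clique_id (graph.length + 1) n0 clique_id 1
    let r2 := loopB2 graph clique_id r1.2 0 r1.1 [] 0
    (r2.1, (r2.2 : Int))

-- ===== PRECONDITION & SPEC =====
-- one step of the pointer walk (a plain dict lookup, not either port's loop)
def pvStep (graph : List (Int × Int)) (o : Option Int) : Option Int := o.bind (pvGet graph)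

-- Pre_: the pointer walk from clique_id returns to clique_id (within graph.length steps, which
-- is automatic since the visited keys are pairwise distinct). Otherwise Python A raises
-- KeyError or loops forever.
def Pre_get_cycle_from_graph (graph : List (Int × Int)) (clique_id : Int) : Prop :=
  ∃ k : Fin graph.length, (pvStep graph)^[k.1 + 1] (some clique_id) = some clique_id
instance (graph : List (Int × Int)) (clique_id : Int) : Decidable (Pre_get_cycle_from_graph graph clique_id) := by unfold Pre_get_cycle_from_graph; infer_instance

def pvWitness_get_cycle_from_graph : (List (Int × Int)) × Int := ([(0, 1), (1, 0)], 0)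

def Spec_get_cycle_from_graph (graph : List (Int × Int)) (clique_id : Int) (out : List Int × Int) : Prop := out = get_cycle_from_graph_alt graph clique_id
instance (graph : List (Int × Int)) (clique_id : Int) (out : List Int × Int) : Decidable (Spec_get_cycle_from_graph graph clique_id out) := by unfold Spec_get_cycle_from_graph; infer_instance

-- ===== CLAIM (what is proved, stated in full; the proofs are below) =====
def Claim_equal_get_cycle_from_graph : Prop := ∀ (graph : List (Int × Int)) (clique_id : Int), Dom_get_cycle_from_graph graph clique_id → Pre_get_cycle_from_graph graph clique_id → Spec_get_cycle_from_graph graph clique_id (get_cycle_from_graph graph clique_id)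

-- ===== LEMMAS AND PROOFS =====

-- the trajectory of the pointer walk, as an Option-valued iterate
def pvF (graph : List (Int × Int)) (clique_id : Int) (n : Nat) : Option Int :=
  (pvStep graph)^[n] (some clique_id)

-- the node visited at step n (defaults never matter inside Pre_)
def pvG (graph : List (Int × Int)) (clique_id : Int) (n : Nat) : Int :=
  (pvF graph clique_id n).getD 0

-- the bare cycle-accumulating walk (proof-side abstraction of both loops)
def walk (graph : List (Int × Int)) (clique_id : Int) :
    Nat → Int → List Int → List Int
  | 0, _, cycle => cycle
  | fuel + 1, curr, cycle =>
    if curr = clique_id then cycle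
    else
      match pvGet graph curr with
      | none => cycle ++ [curr]
      | some nxt => walk graph clique_id fuel nxt (cycle ++ [curr])

-- first index of the minimum of a list (0 for [])
def fmi (l : List Int) : Nat :=
  match PySem.List.min? l (fun x => x) with
  | none => 0
  | some m => (PySem.List.index? l m).getD 0

-- minimum value of a nonempty list (0 for [])
def minL (l : List Int) : Int :=
  match l with
  | [] => 0
  | y :: u => u.foldl min y

lemma min?_cons_eq (x : Int) (t : List Int) :
    PySem.List.min? (x :: t) (fun y => y) = some (t.foldl min x) :=
  PySem.List.min?_id_cons x t

lemma fmi_cons_spec (x : Int) (t : List Int) :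
    ∃ i, PySem.List.index? (x :: t) (t.foldl min x) = some i ∧ fmi (x :: t) = i := by
  have hmem : t.foldl min x ∈ x :: t := PySem.List.min?_mem (min?_cons_eq x t)
  have h := (PySem.List.index?_isSome_iff (x :: t) (t.foldl min x)).2 hmem
  obtain ⟨i, hi⟩ := Option.isSome_iff_exists.1 h
  exact ⟨i, hi, by simp only [fmi, min?_cons_eq, hi, Option.getD_some]⟩

lemma getD_fmi (x : Int) (t : List Int) :
    (x :: t).getD (fmi (x :: t)) 0 = t.foldl min x := by
  obtain ⟨i, hi, hf⟩ := fmi_cons_spec x t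
  obtain ⟨hk, hget, -⟩ := PySem.List.getElem_of_index?_eq_some hi
  rw [hf, List.getD_eq_getElem _ _ hk, hget]

lemma foldl_min_append_singleton (x c : Int) (t : List Int) :
    (t ++ [c]).foldl min x = min (t.foldl min x) c := by
  simp [List.foldl_append]

lemma fmi_append (x curr : Int) (t : List Int) :
    fmi ((x :: t) ++ [curr]) =
      if curr < t.foldl min x then (x :: t).length else fmi (x :: t) := by
  have hmin : ∀ y ∈ x :: t, t.foldl min x ≤ y := by
    intro y hy
    simpa using PySem.List.min?_isMin (min?_cons_eq x t) y hy
  have hcons : (x :: t) ++ [curr] = x :: (t ++ [curr]) := by simp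
  by_cases hlt : curr < t.foldl min x
  · have hmin' : (t ++ [curr]).foldl min x = curr := by
      rw [foldl_min_append_singleton]; omega
    have hnot : curr ∉ x :: t := fun hmem => absurd (hmin curr hmem) (by omega)
    have hidx : PySem.List.index? ((x :: t) ++ [curr]) curr = some (x :: t).length :=
      PySem.List.index?_append_singleton_self (x :: t) curr hnot
    rw [if_pos hlt, hcons]
    simp only [fmi, min?_cons_eq, hmin']
    rw [← hcons, hidx, Option.getD_some]
  · have hmin' : (t ++ [curr]).foldl min x = t.foldl min x := by
      rw [foldl_min_append_singleton]; omega
    have hmem : t.foldl min x ∈ x :: t := PySem.List.min?_mem (min?_cons_eq x t)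
    have hidx := PySem.List.index?_append_of_mem [curr] hmem
    rw [if_neg hlt, hcons]
    simp only [fmi, min?_cons_eq, hmin']
    rw [← hcons, hidx]

-- A's fused loop equals the bare walk paired with the first-min-index of its result
lemma loopA_eq_walk (graph : List (Int × Int)) (clique_id : Int) :
    ∀ fuel curr (x : Int) (t : List Int),
      loopA graph clique_id fuel curr (x :: t) (fmi (x :: t)) =
        (walk graph clique_id fuel curr (x :: t),
          fmi (walk graph clique_id fuel curr (x :: t))) := by
  intro fuel
  induction fuel with
  | zero => intro curr x t; simp [loopA, walk]
  | succ n ih =>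
    intro curr x t
    simp only [loopA, walk]
    split
    · rfl
    · have hstep :
        (if curr < (x :: t).getD (fmi (x :: t)) 0
            then ((x :: t) ++ [curr]).length - 1 else fmi (x :: t)) =
          fmi ((x :: t) ++ [curr]) := by
        rw [getD_fmi, fmi_append]
        split <;> simp
      cases hg : pvGet graph curr with
      | none => rw [hstep]
      | some nxt =>
        rw [hstep, List.cons_append]
        exact ih nxt x (t ++ [curr])

-- B's first loop equals the bare walk's minimum and length
lemma loopB1_eq_walk (graph : List (Int × Int)) (clique_id : Int) :
    ∀ fuel curr (x : Int) (t : List Int),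
      loopB1 graph clique_id fuel curr (minL (x :: t)) (x :: t).length =
        (minL (walk graph clique_id fuel curr (x :: t)),
          (walk graph clique_id fuel curr (x :: t)).length) := by
  intro fuel
  induction fuel with
  | zero => intro curr x t; simp [loopB1, walk]
  | succ n ih =>
    intro curr x t
    simp only [loopB1, walk]
    split
    · rfl
    · have hm : (if curr < minL (x :: t) then curr else minL (x :: t)) =
          minL ((x :: t) ++ [curr]) := by
        simp only [minL, List.cons_append, foldl_min_append_singleton]
        rw [min_def]; split_ifs <;> omega
      have hl : (x :: t).length + 1 = ((x :: t) ++ [curr]).length := by simp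
      cases hg : pvGet graph curr with
      | none => rw [hm, hl]
      | some nxt =>
        rw [hm, hl, List.cons_append]
        exact ih nxt x (t ++ [curr])

lemma pvStep_iterate_none (graph : List (Int × Int)) :
    ∀ n, (pvStep graph)^[n] none = none := by
  intro n
  induction n with
  | zero => rfl
  | succ k ih => rw [Function.iterate_succ_apply, pvStep]; simpa using ih

lemma pvF_add (graph : List (Int × Int)) (clique_id : Int) (m n : Nat) :
    pvF graph clique_id (m + n) = (pvStep graph)^[m] (pvF graph clique_id n) := by
  simp [pvF, Function.iterate_add_apply]

lemma pvF_periodic (graph : List (Int × Int)) (clique_id : Int) (p : Nat)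
    (hp : pvF graph clique_id p = some clique_id) (n : Nat) :
    pvF graph clique_id (n + p) = pvF graph clique_id n := by
  rw [pvF_add, hp]; rfl

lemma pvF_isSome (graph : List (Int × Int)) (clique_id : Int) (p : Nat)
    (hp : pvF graph clique_id p = some clique_id) (hp0 : 0 < p) :
    ∀ i, (pvF graph clique_id i).isSome := by
  intro i
  induction i using Nat.strong_induction_on with
  | _ i ih =>
    by_cases hle : i ≤ p
    · by_contra hnone
      have h0 : pvF graph clique_id i = none := by
        cases h : pvF graph clique_id i with
        | none => rfl
        | some v => rw [h] at hnone; simp at hnone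
      have : pvF graph clique_id p = none := by
        have : p - i + i = p := by omega
        rw [← this, pvF_add, h0, pvStep_iterate_none]
      rw [hp] at this; exact Option.some_ne_none _ this
    · have hlt : i - p < i := by omega
      have := pvF_periodic graph clique_id p hp (i - p)
      have heq : i - p + p = i := by omega
      rw [heq] at this
      rw [this]; exact ih _ hlt

lemma pvG_step (graph : List (Int × Int)) (clique_id : Int) (p : Nat)
    (hp : pvF graph clique_id p = some clique_id) (hp0 : 0 < p) (i : Nat) :
    pvGet graph (pvG graph clique_id i) = some (pvG graph clique_id (i + 1)) := by
  obtain ⟨v, hv⟩ := Option.isSome_iff_exists.1 (pvF_isSome graph clique_id p hp hp0 i)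
  obtain ⟨w, hw⟩ := Option.isSome_iff_exists.1 (pvF_isSome graph clique_id p hp hp0 (i + 1))
  have hsucc : pvF graph clique_id (i + 1) = pvStep graph (pvF graph clique_id i) := by
    simp [pvF, Function.iterate_succ_apply']
  rw [hv, hw] at hsucc
  simp only [pvStep, Option.bind_some] at hsucc
  simp only [pvG, hv, hw, Option.getD_some]
  exact hsucc.symm

-- the bare walk from step j produces exactly the remaining trajectory nodes
lemma walk_g (graph : List (Int × Int)) (clique_id : Int) (L : Nat)
    (hL : pvF graph clique_id L = some clique_id) (hL0 : 0 < L)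
    (hmin : ∀ j, 0 < j → j < L → pvF graph clique_id j ≠ some clique_id) :
    ∀ d j acc fuel, j + d = L → 1 ≤ j → d + 1 ≤ fuel →
      walk graph clique_id fuel (pvG graph clique_id j) acc =
        acc ++ (List.range' j d).map (pvG graph clique_id) := by
  intro d
  induction d with
  | zero =>
    intro j acc fuel hjd hj hfuel
    obtain ⟨f, rfl⟩ : ∃ f, fuel = f + 1 := ⟨fuel - 1, by omega⟩
    have hj' : j = L := by omega
    have : pvG graph clique_id j = clique_id := by
      rw [hj', pvG, hL]; rfl
    simp [walk, this]
  | succ d ih =>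
    intro j acc fuel hjd hj hfuel
    obtain ⟨f, rfl⟩ : ∃ f, fuel = f + 1 := ⟨fuel - 1, by omega⟩
    have hjL : j < L := by omega
    have hne : pvG graph clique_id j ≠ clique_id := by
      intro h
      apply hmin j hj hjL
      obtain ⟨v, hv⟩ := Option.isSome_iff_exists.1 (pvF_isSome graph clique_id L hL hL0 j)
      rw [hv]
      have : v = clique_id := by rw [pvG, hv] at h; simpa using h
      rw [this]
    rw [walk, if_neg hne, pvG_step graph clique_id L hL hL0 j]
    show walk graph clique_id f (pvG graph clique_id (j + 1)) (acc ++ [pvG graph clique_id j]) =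
      acc ++ (List.range' j (d + 1)).map (pvG graph clique_id)
    rw [ih (j + 1) (acc ++ [pvG graph clique_id j]) f (by omega) (by omega) (by omega)]
    rw [List.range'_succ]
    simp

-- B's second loop emits the trajectory from index mi and ends with pos at the unique hit of clique_id
lemma loopB2_run (graph : List (Int × Int)) (clique_id : Int) (L mi i0 : Nat)
    (hstep : ∀ i, pvGet graph (pvG graph clique_id i) = some (pvG graph clique_id (i + 1)))
    (hi0 : i0 < L)
    (hcid : ∀ t, t < L → (pvG graph clique_id (mi + t) = clique_id ↔ t = i0)) :
    ∀ k i out pos, i + k = L → (pos = i0 ∨ i ≤ i0) →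
      loopB2 graph clique_id k i (pvG graph clique_id (mi + i)) out pos =
        (out ++ (List.range' i k).map (fun t => pvG graph clique_id (mi + t)), i0) := by
  intro k
  induction k with
  | zero =>
    intro i out pos hik hpos
    have hpos0 : pos = i0 := by
      rcases hpos with h | h
      · exact h
      · omega
    simp [loopB2, hpos0]
  | succ k ih =>
    intro i out pos hik hpos
    have hiL : i < L := by omega
    simp only [loopB2]
    have hpos' : (if pvG graph clique_id (mi + i) = clique_id then i else pos) = i0 ∨
        i + 1 ≤ i0 := by
      by_cases h : i = i0
      · left; rw [if_pos ((hcid i hiL).2 h), h]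
      · rw [if_neg (fun hc => h ((hcid i hiL).1 hc))]
        rcases hpos with hp | hp
        · exact Or.inl hp
        · exact Or.inr (by omega)
    rw [hstep (mi + i)]
    have harg : mi + i + 1 = mi + (i + 1) := by omega
    rw [harg]
    have hrec := ih (i + 1) (out ++ [pvG graph clique_id (mi + i)])
      (if pvG graph clique_id (mi + i) = clique_id then i else pos)
      (by omega) hpos'
    rw [List.range'_succ]
    show loopB2 graph clique_id k (i + 1) (pvG graph clique_id (mi + (i + 1)))
        (out ++ [pvG graph clique_id (mi + i)])
        (if pvG graph clique_id (mi + i) = clique_id then i else pos) =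
      (out ++ (i :: List.range' (i + 1) k).map (fun t => pvG graph clique_id (mi + t)), i0)
    rw [hrec]
    simp

lemma pvF_mod (graph : List (Int × Int)) (clique_id : Int) (L : Nat)
    (hL : pvF graph clique_id L = some clique_id) (hL0 : 0 < L) :
    ∀ j, pvF graph clique_id j = pvF graph clique_id (j % L) := by
  intro j
  induction j using Nat.strong_induction_on with
  | _ j ih =>
    by_cases h : j < L
    · rw [Nat.mod_eq_of_lt h]
    · have h1 : j - L + L = j := by omega
      have h2 := pvF_periodic graph clique_id L hL (j - L)
      rw [h1] at h2
      have h3 : (j - L) % L = j % L := (Nat.mod_eq_sub_mod (by omega)).symm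
      rw [h2, ih (j - L) (by omega), h3]

lemma pvG_eq_cid_iff (graph : List (Int × Int)) (clique_id : Int) (L : Nat)
    (hL : pvF graph clique_id L = some clique_id) (hL0 : 0 < L)
    (hmin : ∀ j, 0 < j → j < L → pvF graph clique_id j ≠ some clique_id) :
    ∀ j, pvG graph clique_id j = clique_id ↔ j % L = 0 := by
  intro j
  constructor
  · intro h
    obtain ⟨v, hv⟩ := Option.isSome_iff_exists.1 (pvF_isSome graph clique_id L hL hL0 j)
    have hv' : pvF graph clique_id j = some clique_id := by
      rw [hv]; rw [pvG, hv] at h; simpa using h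
    by_contra hr
    have hrlt : j % L < L := Nat.mod_lt _ hL0
    have := hmin (j % L) (by omega) hrlt
    rw [← pvF_mod graph clique_id L hL hL0 j] at this
    exact this hv'
  · intro h
    have := pvF_mod graph clique_id L hL hL0 j
    rw [h] at this
    rw [pvG, this]; rfl

lemma pvG_periodic (graph : List (Int × Int)) (clique_id : Int) (L : Nat)
    (hL : pvF graph clique_id L = some clique_id) (s : Nat) :
    pvG graph clique_id (L + s) = pvG graph clique_id s := by
  rw [pvG, pvG, Nat.add_comm L s, pvF_periodic graph clique_id L hL s]

theorem get_cycle_from_graph_spec : Claim_equal_get_cycle_from_graph := by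
  intro graph clique_id _ hpre
  unfold Spec_get_cycle_from_graph get_cycle_from_graph get_cycle_from_graph_alt
  obtain ⟨k, hk⟩ := hpre
  have hex : ∃ n, 0 < n ∧ pvF graph clique_id n = some clique_id := ⟨k.1 + 1, Nat.succ_pos _, hk⟩
  set L := Nat.find hex with hLdef
  obtain ⟨hL0, hLcid⟩ := Nat.find_spec hex
  have hmin : ∀ j, 0 < j → j < L → pvF graph clique_id j ≠ some clique_id := by
    intro j hj hjL hc
    exact Nat.find_min hex hjL ⟨hj, hc⟩
  have hLle : L ≤ graph.length := by
    have h1 : L ≤ k.1 + 1 := Nat.find_le ⟨Nat.succ_pos _, hk⟩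
    have := k.2
    omega
  -- the first pointer lookup succeeds
  have hF1 : pvF graph clique_id 1 = pvGet graph clique_id := by
    simp [pvF, pvStep]
  cases hg : pvGet graph clique_id with
  | none =>
    exfalso
    have : pvF graph clique_id L = none := by
      have h1 : L - 1 + 1 = L := by omega
      rw [← h1, pvF_add, hF1, hg, pvStep_iterate_none]
    rw [hLcid] at this; exact Option.some_ne_none _ this
  | some c0 =>
    have hg1 : pvG graph clique_id 1 = c0 := by rw [pvG, hF1, hg]; rfl
    have hg0 : pvG graph clique_id 0 = clique_id := rfl
    -- the bare walk produces the trajectory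
    have hwalk : walk graph clique_id (graph.length + 1) c0 [clique_id] =
        (List.range L).map (pvG graph clique_id) := by
      have := walk_g graph clique_id L hLcid hL0 hmin (L - 1) 1 [clique_id]
        (graph.length + 1) (by omega) (le_refl 1) (by omega)
      rw [hg1] at this
      rw [this, List.range_eq_range']
      have hsplit : List.range' 0 L = 0 :: List.range' 1 (L - 1) := by
        conv_lhs => rw [show L = (L - 1) + 1 by omega]
        rw [List.range'_succ]
      rw [hsplit]
      simp [hg0]
    set traj := walk graph clique_id (graph.length + 1) c0 [clique_id] with htraj
    have hlen : traj.length = L := by rw [hwalk]; simp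
    -- traj is nonempty, decompose
    obtain ⟨x, t, hxt⟩ : ∃ x t, traj = x :: t := by
      cases h : traj with
      | nil => rw [h] at hlen; simp at hlen; omega
      | cons a b => exact ⟨a, b, rfl⟩
    -- A's loop
    have hfmi0 : fmi [clique_id] = 0 := by
      simp only [fmi, min?_cons_eq, List.foldl_nil, PySem.List.index?_cons_self,
        Option.getD_some]
    have hA := loopA_eq_walk graph clique_id (graph.length + 1) c0 clique_id []
    rw [hfmi0, ← htraj] at hA
    set mi := fmi traj with hmidef
    -- mi < L and traj[mi] is the minimum
    obtain ⟨i, hi, hf⟩ := fmi_cons_spec x t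
    obtain ⟨hk2, hget, -⟩ := PySem.List.getElem_of_index?_eq_some hi
    have hmiL : mi < L := by
      rw [hmidef, hxt, hf, ← hlen, hxt]; exact hk2
    have hminval : traj.getD mi 0 = minL traj := by
      rw [hxt, hmidef, hxt]
      exact getD_fmi x t
    have hgetD : traj.getD mi 0 = pvG graph clique_id mi := by
      rw [hwalk, List.getD_eq_getElem _ _ (by simp; omega)]
      simp
    -- B's first loop
    have hB1 := loopB1_eq_walk graph clique_id (graph.length + 1) c0 clique_id []
    have hminL1 : minL [clique_id] = clique_id := rfl
    rw [hminL1, ← htraj] at hB1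
    have hB1' : loopB1 graph clique_id (graph.length + 1) c0 clique_id 1 =
        (pvG graph clique_id mi, L) := by
      have h1 : (List.length [clique_id] : Nat) = 1 := rfl
      rw [← h1] at hB1 ⊢
      rw [hB1, hlen, ← hminval, hgetD]
    -- B's second loop
    set i0 : Nat := if mi = 0 then 0 else L - mi with hi0def
    have hi0L : i0 < L := by rw [hi0def]; split <;> omega
    have hcid : ∀ s, s < L → (pvG graph clique_id (mi + s) = clique_id ↔ s = i0) := by
      intro s hs
      rw [pvG_eq_cid_iff graph clique_id L hLcid hL0 hmin]
      constructor
      · intro h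
        have hdvd : L ∣ (mi + s) := Nat.dvd_of_mod_eq_zero h
        obtain ⟨q, hq⟩ := hdvd
        have hlt2 : mi + s < 2 * L := by omega
        match q, hq with
        | 0, hq =>
          simp only [Nat.mul_zero] at hq
          rw [hi0def]; split_ifs <;> omega
        | 1, hq =>
          simp only [Nat.mul_one] at hq
          rw [hi0def]; split_ifs <;> omega
        | (q + 2), hq =>
          exfalso
          have hexp : L * (q + 2) = L * q + 2 * L := by ring
          rw [hexp] at hq
          omega
      · intro h
        rw [hi0def] at h
        by_cases hmi0 : mi = 0
        · subst h; simp [hmi0]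
        · rw [if_neg hmi0] at h
          subst h
          have : mi + (L - mi) = L := by omega
          rw [this, Nat.mod_self]
    have hB2 := loopB2_run graph clique_id L mi i0
      (pvG_step graph clique_id L hLcid hL0) hi0L hcid L 0 [] 0
      (by omega) (Or.inr (Nat.zero_le _))
    rw [Nat.add_zero] at hB2
    -- assemble
    simp only [hA, hB1', hB2, List.nil_append]
    simp only [Prod.mk.injEq]
    refine ⟨?_, ?_⟩
    · -- rotated list equality
      rw [PySem.List.slice_from_natCast, PySem.List.slice_to_natCast]
      have hsplitL : List.range L = List.range' 0 mi ++ List.range' mi (L - mi) := by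
        have h : List.range' 0 mi ++ List.range' (0 + 1 * mi) (L - mi) =
            List.range' 0 (mi + (L - mi)) := List.range'_append
        simp only [Nat.one_mul, Nat.zero_add] at h
        rw [List.range_eq_range']
        conv_lhs => rw [show L = mi + (L - mi) from by omega]
        rw [← h]
      have hdrop : traj.drop mi = (List.range' mi (L - mi)).map (pvG graph clique_id) := by
        rw [hwalk, hsplitL, List.map_append]
        rw [List.drop_append_of_le_length (by simp)]
        simp
      have htake : traj.take mi = (List.range' 0 mi).map (pvG graph clique_id) := by
        rw [hwalk, hsplitL, List.map_append]
        rw [List.take_append_of_le_length (by simp)]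
        simp
      rw [hdrop, htake]
      have hmr : (List.range' 0 L).map (fun x => mi + x) = List.range' (mi + 0) L :=
        List.map_add_range' 0 L 1
      rw [Nat.add_zero] at hmr
      have hmapadd : (List.range' 0 L).map (fun t => pvG graph clique_id (mi + t)) =
          (List.range' mi L).map (pvG graph clique_id) := by
        rw [← hmr, List.map_map]
        rfl
      rw [hmapadd]
      have hsplit2 : List.range' mi L = List.range' mi (L - mi) ++ List.range' L mi := by
        have h : List.range' mi (L - mi) ++ List.range' (mi + 1 * (L - mi)) mi =
            List.range' mi (L - mi + mi) := List.range'_append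
        simp only [] at h
        rw [show mi + 1 * (L - mi) = L from by omega] at h
        conv_lhs => rw [show L = (L - mi) + mi from by omega]
        rw [← h]
      rw [hsplit2, List.map_append]
      congr 1
      have hr : List.range' L mi = (List.range' 0 mi).map (fun s => L + s) := by
        have h : (List.range' 0 mi).map (fun x => L + x) = List.range' (L + 0) mi :=
          List.map_add_range' 0 mi 1
        rw [Nat.add_zero] at h
        rw [h]
      rw [hr, List.map_map]
      apply List.map_congr_left
      intro s hs
      simp only [Function.comp_apply]
      exact (pvG_periodic graph clique_id L hLcid s).symm
    · -- position equality
      rw [hlen]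
      rw [PySem.Int.mod_eq_emod_of_pos (by exact_mod_cast hL0)]
      rw [hi0def]
      split
      · rename_i h
        rw [h]
        simp
      · rename_i h
        have hmi1 : 1 ≤ mi := by omega
        have h1 : ((L : Int) - (mi : Int)) % (L : Int) = (L : Int) - (mi : Int) := by
          apply Int.emod_eq_of_lt <;> omega
        rw [h1]
        omega
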